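-- pv_equiv track=rewrite | github.com/shinomiya-akirawane/UCL_CS | UCL_CS_ENGF0002/assignment1/Exercise5.py | possibilityCounter
-- ===== SOURCE A (Python) =====
-- def possibilityCounter(plaintext,wordsDictionary):
--     possibility=0
--     for word in wordsDictionary:
--         if word in plaintext:
--             possibility+=1
--         else:
--             possibility-=1
--     return possibility
-- ===== SOURCE B (Python) =====
-- def possibilityCounter(plaintext, wordsDictionary):
--     # Stage 1: group duplicate words with a frequency dict (each distinct word
--     # is membership-tested only once).
--     tally = {}
--     for word in wordsDictionary:
--         tally[word] = tally.get(word, 0) + 1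
--     # Stage 2: one membership test per DISTINCT word, weighted by multiplicity.
--     score = 0
--     for word, c in tally.items():
--         score += c if word in plaintext else -c
--     return score
-- ===== Notes on version B (the rewrite author's own statement) =====
-- stated objective: alternative
-- what changed: B first groups the word list into a frequency dict in one pass, then runs ONE substring test per DISTINCT word and adds/subtracts its multiplicity, instead of A's per-occurrence test-and-accumulate loop.
import Mathlib
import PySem

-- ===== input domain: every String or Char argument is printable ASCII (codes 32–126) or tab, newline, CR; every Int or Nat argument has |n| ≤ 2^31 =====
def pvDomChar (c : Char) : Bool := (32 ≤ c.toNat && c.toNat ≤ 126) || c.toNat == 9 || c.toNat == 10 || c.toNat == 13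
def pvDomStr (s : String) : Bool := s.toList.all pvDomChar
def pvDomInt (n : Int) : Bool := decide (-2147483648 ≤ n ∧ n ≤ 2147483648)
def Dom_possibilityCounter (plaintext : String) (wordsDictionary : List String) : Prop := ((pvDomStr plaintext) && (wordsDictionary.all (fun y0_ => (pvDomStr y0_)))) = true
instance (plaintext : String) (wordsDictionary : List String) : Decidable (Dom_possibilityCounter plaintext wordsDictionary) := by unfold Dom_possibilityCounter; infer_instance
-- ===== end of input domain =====

-- B groups the words into a frequency dict first and membership-tests each DISTINCT word once,
-- adding its multiplicity, so duplicate words are substring-scanned only once (objective: alternative).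

-- ===== PORT A =====
def possibilityCounter (plaintext : String) (wordsDictionary : List String) : Int :=
  wordsDictionary.foldl
    (fun possibility word =>
      if PySem.Str.isIn word plaintext then possibility + 1 else possibility - 1) 0

-- ===== PORT B =====
def possibilityCounter_alt (plaintext : String) (wordsDictionary : List String) : Int :=
  let tally : PySem.Dict String Int :=
    wordsDictionary.foldl (fun d word => d.insert word (d.getD word 0 + 1)) PySem.Dict.empty
  tally.items.foldl
    (fun score wc => score + (if PySem.Str.isIn wc.1 plaintext then wc.2 else -wc.2)) 0

-- ===== PRECONDITION & SPEC =====
def Spec_possibilityCounter (plaintext : String) (wordsDictionary : List String) (out : Int) : Prop := out = possibilityCounter_alt plaintext wordsDictionary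
instance (plaintext : String) (wordsDictionary : List String) (out : Int) : Decidable (Spec_possibilityCounter plaintext wordsDictionary out) := by unfold Spec_possibilityCounter; infer_instance

-- ===== CLAIM (what is proved, stated in full; the proofs are below) =====
def Claim_equal_possibilityCounter : Prop := ∀ (plaintext : String) (wordsDictionary : List String), Dom_possibilityCounter plaintext wordsDictionary → Spec_possibilityCounter plaintext wordsDictionary (possibilityCounter plaintext wordsDictionary)

-- ===== LEMMAS AND PROOFS =====

-- A's accumulator loop is 2*(number of present words) - length.
theorem pvFoldlScoreA (plaintext : String) (ws : List String) (acc : Int) :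
    ws.foldl (fun possibility word =>
        if PySem.Str.isIn word plaintext then possibility + 1 else possibility - 1) acc
      = acc + 2 * (ws.countP (fun word => PySem.Str.isIn word plaintext) : Int)
          - (ws.length : Int) := by
  induction ws generalizing acc with
  | nil => simp
  | cons w ws ih =>
    simp only [List.foldl_cons, List.countP_cons, List.length_cons]
    by_cases h : PySem.Str.isIn w plaintext = true
    · rw [if_pos h, ih]; simp only [h, if_true]; push_cast; ring
    · rw [if_neg h, ih]
      rw [Bool.not_eq_true] at h
      simp only [h, Bool.false_eq_true, if_false]; push_cast; ring

-- Generic: a ±-weighted sum over any list splits into the two filtered sums.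
theorem pvSumSplit {α : Type} (p : α → Bool) (c : α → Int) (l : List α) (acc : Int) :
    l.foldl (fun s k => s + (if p k then c k else -(c k))) acc
      = acc + ((l.filter p).map c).sum - ((l.filter (fun k => !p k)).map c).sum := by
  induction l generalizing acc with
  | nil => simp
  | cons a l ih =>
    simp only [List.foldl_cons, ih]
    by_cases h : p a = true <;> simp [h] <;> ring

-- PySem.Set.ofList ws is a permutation of Mathlib's ws.dedup (both nodup, same members).
theorem pvOfListPermDedup (ws : List String) : (PySem.Set.ofList ws).Perm ws.dedup := by
  apply (List.perm_ext_iff_of_nodup (PySem.Set.nodup_ofList ws) ws.nodup_dedup).mpr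
  intro a; rw [PySem.Set.mem_ofList, List.mem_dedup]

-- Summing multiplicities of the distinct words satisfying p gives countP p on the raw list.
theorem pvFilterCountSum (p : String → Bool) (ws : List String) :
    (((PySem.Set.ofList ws).filter p).map (fun k => (ws.count k : Int))).sum
      = (ws.countP p : Int) := by
  have hperm : (((PySem.Set.ofList ws).filter p).map (fun k => (ws.count k : Int))).Perm
      (((ws.dedup.filter p)).map (fun k => (ws.count k : Int))) :=
    ((pvOfListPermDedup ws).filter p).map _
  rw [hperm.sum_eq, ← List.sum_map_count_dedup_filter_eq_countP p ws]
  push_cast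
  rw [List.map_map]
  rfl

-- ===== VERDICT (by name: the statement is the Claim_ definition above) =====
theorem possibilityCounter_spec : Claim_equal_possibilityCounter := by
  intro plaintext ws _
  unfold Spec_possibilityCounter possibilityCounter possibilityCounter_alt
  rw [pvFoldlScoreA]
  simp only [PySem.Dict.foldl_insert_getD_add_one_eq_counter]
  rw [show (PySem.Dict.counter ws).items
        = (PySem.Set.ofList ws).map (fun k => (k, (ws.count k : Int))) from
      PySem.Dict.items_counter ws]
  set p : String → Bool := fun word => PySem.Str.isIn word plaintext with hp
  have hfold : ((PySem.Set.ofList ws).map (fun k => (k, (ws.count k : Int)))).foldl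
      (fun score wc => score + (if PySem.Str.isIn wc.1 plaintext then wc.2 else -wc.2)) 0
      = (PySem.Set.ofList ws).foldl
        (fun score k => score + (if p k then (ws.count k : Int) else -(ws.count k : Int))) 0 := by
    rw [List.foldl_map]
  rw [hfold, pvSumSplit p (fun k => (ws.count k : Int)) (PySem.Set.ofList ws) 0,
      pvFilterCountSum p ws, pvFilterCountSum (fun k => !p k) ws]
  have hlen := List.length_eq_countP_add_countP (l := ws) (p := p)
  simp only [decide_not, Bool.decide_eq_true] at hlen
  omega
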